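-- pv_equiv track=rewrite | github.com/CircuitCM/FlashCards | CMDer.py | _quote_breaker
-- ===== SOURCE A (Python) =====
-- _SBREAKS = {'`','"',"'"}
--
-- def _min_k(bp:dict,ltx:int):
--     minv = ltx
--     mink = None
--     for k, v in bp.items():
--         if len(v[1])>v[0]+1:
--             p = v[1][v[0]]
--             if minv>p:
--                 minv=p
--                 mink=k
--     return mink, minv
--
-- def _quote_breaker(tx:str):
--     bp = {s:[0,[]] for s in _SBREAKS}
--     ltx= len(tx)
--     for n, i in filter(lambda m: m[0] in _SBREAKS, zip(tx,range(0,ltx))):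
--         bp[n][1].append(i)
--     mink, minv = _min_k(bp,ltx)
--     intrv=[]
--     while mink is not None:
--         ml = bp[mink]
--         nv = ml[1][ml[0]+1]
--         intrv.append((minv,nv))
--         for k,v in filter(lambda n: n[0]!=mink, bp.items()):
--             while v[0]<len(v[1]) and v[1][v[0]]<nv:
--                 v[0]+=1
--         ml[0]+=2
--         mink, minv = _min_k(bp, ltx)
--     return intrv
-- ===== SOURCE B (Python) =====
-- _SBREAKS = {'`', '"', "'"}
--
-- def _quote_breaker(tx: str):
--     intrv = []
--     i = 0
--     n = len(tx)
--     while i < n: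
--         c = tx[i]
--         if c in _SBREAKS:
--             j = tx.find(c, i + 1)
--             if j != -1:
--                 intrv.append((i, j))
--                 i = j + 1
--                 continue
--         i += 1
--     return intrv
-- ===== Notes on version B (the rewrite author's own statement) =====
-- stated objective: simpler
-- what changed: Replaced A's per-character position lists with the _min_k pointer-merge over a dict of cursors by a single forward index scan: at each quote character look up its next occurrence with str.find, emit the pair and jump past it.
import Mathlib
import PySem

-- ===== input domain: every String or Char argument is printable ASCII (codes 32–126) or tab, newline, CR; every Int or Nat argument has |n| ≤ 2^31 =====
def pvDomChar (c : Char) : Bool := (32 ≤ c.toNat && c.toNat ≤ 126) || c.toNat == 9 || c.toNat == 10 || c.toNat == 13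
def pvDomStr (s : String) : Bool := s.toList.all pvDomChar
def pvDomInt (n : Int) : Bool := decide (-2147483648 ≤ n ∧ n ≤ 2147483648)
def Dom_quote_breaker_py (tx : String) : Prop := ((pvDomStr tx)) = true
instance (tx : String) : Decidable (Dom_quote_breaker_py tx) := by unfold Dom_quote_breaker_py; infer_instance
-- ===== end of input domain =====

-- B replaces A's per-character position lists and `_min_k` pointer merge by a single
-- forward scan with `str.find`; same return value on every input (objective: simpler).

-- ===== PORT A =====
-- _SBREAKS (the Python set literal; iteration order of the CPython set is hash-dependent,
-- but A's result does not depend on it: positions of distinct characters are distinct)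
def pvSBreaks : List Char := ['`', '"', '\'']

-- _min_k(bp, ltx): fold over bp.items() keeping the strictly smallest next position
-- among keys with at least two unconsumed occurrences
def pvMinK (bp : List (Char × Int × List Int)) (ltx : Int) : Option Char × Int :=
  bp.foldl (fun acc kv =>
      if ((kv.2.2.length : Int)) > kv.2.1 + 1 then
        if acc.2 > PySem.List.pyGetD kv.2.2 kv.2.1 0 then
          (some kv.1, PySem.List.pyGetD kv.2.2 kv.2.1 0)
        else acc
      else acc)
    (none, ltx)

-- the inner `while v[0]<len(v[1]) and v[1][v[0]]<nv: v[0]+=1`, with fuel making the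
-- while-loop structurally total (fuel ps.length+1 is enough: the pointer stays ≤ length)
def pvAdvance (fuel : Nat) (p0 : Int) (ps : List Int) (nv : Int) : Int :=
  match fuel with
  | 0 => p0
  | f + 1 =>
    if p0 < (ps.length : Int) ∧ PySem.List.pyGetD ps p0 0 < nv then
      pvAdvance f (p0 + 1) ps nv
    else p0

-- bp[mink] (key always present: mink comes from bp's keys)
def pvLookup (bp : List (Char × Int × List Int)) (k : Char) : Int × List Int :=
  ((bp.find? (fun kv => kv.1 == k)).map (·.2)).getD (0, [])

-- the outer `while mink is not None` loop, with fuel (len(tx)+1 iterations always suffice: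
-- each iteration advances mink's pointer by 2 and pointers never pass their list's length)
def pvLoopA (fuel : Nat) (bp : List (Char × Int × List Int)) (ltx : Int)
    (mink : Option Char) (minv : Int) (intrv : List (Int × Int)) : List (Int × Int) :=
  match fuel with
  | 0 => intrv
  | f + 1 =>
    match mink with
    | none => intrv
    | some mk =>
      let ml := pvLookup bp mk
      let nv := PySem.List.pyGetD ml.2 (ml.1 + 1) 0   -- ml[1][ml[0]+1]; in range when mink was chosen
      let intrv' := intrv ++ [(minv, nv)]
      -- the `for k,v in filter(k!=mink)` pointer advance, and `ml[0]+=2`, in one pass over bp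
      let bp' := bp.map (fun kv =>
        if kv.1 = mk then (kv.1, kv.2.1 + 2, kv.2.2)
        else (kv.1, pvAdvance (kv.2.2.length + 1) kv.2.1 kv.2.2 nv, kv.2.2))
      let m' := pvMinK bp' ltx
      pvLoopA f bp' ltx m'.1 m'.2 intrv'

def quote_breaker_py (tx : String) : List (Int × Int) :=
  let cs := tx.toList
  let ltx : Int := PySem.Str.len tx
  let bp0 : List (Char × Int × List Int) := pvSBreaks.map (fun s => (s, 0, []))
  -- for n,i in filter(lambda m: m[0] in _SBREAKS, zip(tx, range(0, ltx))): bp[n][1].append(i)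
  let bp := ((cs.zip (PySem.List.pyRange 0 ltx 1)).filter (fun m => m.1 ∈ pvSBreaks)).foldl
    (fun b ni => b.map (fun kv => if kv.1 = ni.1 then (kv.1, kv.2.1, kv.2.2 ++ [ni.2]) else kv)) bp0
  let m := pvMinK bp ltx
  pvLoopA (cs.length + 1) bp ltx m.1 m.2 []

-- ===== PORT B =====
-- the `while i < n` scan of Source B (j = tx.find(tx[i], i+1) is recomputed where used)
def pvScanB (cs : List Char) (i : Nat) : List (Int × Int) :=
  if h : i < cs.length then
    if cs[i] ∈ pvSBreaks then
      if hj : PySem.Chars.findFrom cs [cs[i]] ((i + 1 : Nat) : Int) none ≠ -1 then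
        ((i : Int), PySem.Chars.findFrom cs [cs[i]] ((i + 1 : Nat) : Int) none)
          :: pvScanB cs ((PySem.Chars.findFrom cs [cs[i]] ((i + 1 : Nat) : Int) none).toNat + 1)
      else pvScanB cs (i + 1)
    else pvScanB cs (i + 1)
  else []
termination_by cs.length - i
decreasing_by
  · have hs := (PySem.Chars.findFrom_natCast_spec cs [cs[i]] (i+1) (by omega) hj).1
    omega
  · omega
  · omega

def quote_breaker_py_alt (tx : String) : List (Int × Int) := pvScanB tx.toList 0

-- ===== PRECONDITION & SPEC =====
def Spec_quote_breaker_py (tx : String) (out : List (Int × Int)) : Prop := out = quote_breaker_py_alt tx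
instance (tx : String) (out : List (Int × Int)) : Decidable (Spec_quote_breaker_py tx out) := by unfold Spec_quote_breaker_py; infer_instance

-- ===== CLAIM (what is proved, stated in full; the proofs are below) =====
def Claim_equal_quote_breaker_py : Prop := ∀ (tx : String), Dom_quote_breaker_py tx → Spec_quote_breaker_py tx (quote_breaker_py tx)

-- ===== LEMMAS AND PROOFS =====

-- positions (as Python ints) of character c in t, when t starts at absolute index s
def pvOcc (t : List Char) (s : Int) (c : Char) : List Int :=
  match t with
  | [] => []
  | d :: r => (if d = c then [s] else []) ++ pvOcc r (s + 1) c

-- A's dict state when the scan has consumed cs[0:p]: each pointer sits at the first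
-- occurrence ≥ p of its character
def pvState (cs : List Char) (p : Nat) : List (Char × Int × List Int) :=
  pvSBreaks.map (fun c => (c, ((pvOcc (cs.take p) 0 c).length : Int), pvOcc cs 0 c))

lemma pvOcc_append (t1 t2 : List Char) (s : Int) (c : Char) :
    pvOcc (t1 ++ t2) s c = pvOcc t1 s c ++ pvOcc t2 (s + t1.length) c := by
  induction t1 generalizing s with
  | nil => simp [pvOcc]
  | cons d r ih =>
    simp only [pvOcc, List.cons_append, List.length_cons, ih, List.append_assoc]
    have h1 : s + 1 + (r.length : Int) = s + ((r.length + 1 : Nat) : Int) := by push_cast; ring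
    rw [h1]

lemma pvOcc_mem (t : List Char) (s : Int) (c : Char) (x : Int) :
    x ∈ pvOcc t s c ↔ ∃ k : Nat, k < t.length ∧ x = s + k ∧ t[k]? = some c := by
  induction t generalizing s with
  | nil => simp [pvOcc]
  | cons d r ih =>
    simp only [pvOcc, List.mem_append, ih, List.length_cons]
    constructor
    · rintro (hx | ⟨k, hk, rfl, hkc⟩)
      · have hdc : d = c ∧ x = s := by split at hx <;> simp_all
        exact ⟨0, by omega, by simp [hdc.2], by simp [hdc.1]⟩
      · exact ⟨k + 1, by omega, by push_cast; ring_nf, by simpa using hkc⟩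
    · rintro ⟨k, hk, rfl, hkc⟩
      cases k with
      | zero => left; simp at hkc; simp [hkc]
      | succ k =>
        right
        exact ⟨k, by omega, by push_cast; ring, by simpa using hkc⟩

lemma pvOcc_bounds (t : List Char) (s : Int) (c : Char) (x : Int) (hx : x ∈ pvOcc t s c) :
    s ≤ x ∧ x < s + t.length := by
  rcases (pvOcc_mem t s c x).1 hx with ⟨k, hk, rfl, -⟩
  constructor <;> [omega; (push_cast; omega)]

lemma pvOcc_sorted (t : List Char) (s : Int) (c : Char) :
    (pvOcc t s c).Pairwise (· < ·) := by
  induction t generalizing s with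
  | nil => simp [pvOcc]
  | cons d r ih =>
    have hb : ∀ y ∈ pvOcc r (s+1) c, s < y := fun y hy => by
      have := (pvOcc_bounds r (s+1) c y hy).1; omega
    by_cases hd : d = c
    · have e : pvOcc (d :: r) s c = s :: pvOcc r (s+1) c := by simp [pvOcc, hd]
      rw [e, List.pairwise_cons]
      exact ⟨hb, ih (s+1)⟩
    · simpa [pvOcc, hd] using ih (s+1)

lemma pvOcc_split (cs : List Char) (p : Nat) (c : Char) (hp : p ≤ cs.length) :
    pvOcc cs 0 c = pvOcc (cs.take p) 0 c ++ pvOcc (cs.drop p) p c := by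
  have := pvOcc_append (cs.take p) (cs.drop p) 0 c
  simpa [List.length_take, Nat.min_eq_left hp] using this

-- membership in the suffix-occurrence list, in terms of cs itself
lemma pvOcc_drop_mem (cs : List Char) (p : Nat) (c : Char) (r : Nat) :
    ((r : Int) ∈ pvOcc (cs.drop p) p c) ↔ (p ≤ r ∧ r < cs.length ∧ cs[r]? = some c) := by
  rw [pvOcc_mem]
  constructor
  · rintro ⟨k, hk, hkr, hkc⟩
    have hr : r = p + k := by omega
    subst hr
    rw [List.getElem?_drop] at hkc
    exact ⟨by omega, by simp at hk; omega, hkc⟩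
  · rintro ⟨h1, h2, h3⟩
    exact ⟨r - p, by simp; omega, by push_cast; omega, by rw [List.getElem?_drop]; simpa [Nat.add_sub_cancel' h1] using h3⟩

lemma head_min (l : List Int) (x : Int) (r : List Int) (hl : l.Pairwise (· < ·))
    (he : l = x :: r) (y : Int) (hy : y ∈ l) : x ≤ y := by
  subst he
  rcases List.mem_cons.1 hy with rfl | hy
  · exact le_refl y
  · exact le_of_lt ((List.pairwise_cons.1 hl).1 y hy)

lemma two_mem_two_le (l : List Int) (x y : Int) (hx : x ∈ l) (hy : y ∈ l) (hne : x ≠ y) :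
    2 ≤ l.length := by
  match l with
  | [] => simp at hx
  | [a] => simp at hx hy; omega
  | a :: b :: t => simp

lemma pyGetD_append_len (A B : List Int) (k : Nat) :
    PySem.List.pyGetD (A ++ B) (((A.length + k : Nat) : Int)) 0 = B.getD k 0 := by
  rw [PySem.List.pyGetD_natCast]
  simp [List.getD_eq_getElem?_getD, List.getElem?_append_right]

-- the inner while-loop lands exactly at the split point of <nv / ≥nv occurrences
lemma pvAdvance_spec (a b : List Int) (nv : Int) (ha : ∀ x ∈ a, x < nv)
    (hb : ∀ x ∈ b, ¬ x < nv) : ∀ (fuel p0 : Nat), p0 ≤ a.length → a.length - p0 < fuel →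
    pvAdvance fuel (p0 : Int) (a ++ b) nv = (a.length : Int) := by
  intro fuel
  induction fuel with
  | zero => intro p0 h1 h2; omega
  | succ f ih =>
    intro p0 h1 h2
    show (if (p0 : Int) < ((a ++ b).length : Int) ∧ PySem.List.pyGetD (a ++ b) (p0 : Int) 0 < nv
      then pvAdvance f ((p0 : Int) + 1) (a ++ b) nv else (p0 : Int)) = (a.length : Int)
    by_cases hlt : p0 < a.length
    · have hget : PySem.List.pyGetD (a ++ b) (p0 : Int) 0 = a[p0] := by
        rw [PySem.List.pyGetD_natCast]
        simp [List.getD_eq_getElem?_getD, List.getElem?_append_left hlt, List.getElem?_eq_getElem hlt]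
      rw [if_pos ⟨by simp; omega, by rw [hget]; exact ha _ (List.getElem_mem hlt)⟩]
      have e : ((p0 : Int) + 1) = ((p0 + 1 : Nat) : Int) := by push_cast; ring
      rw [e]
      exact ih (p0 + 1) (by omega) (by omega)
    · have hp0 : p0 = a.length := by omega
      rw [if_neg, hp0]
      rintro ⟨hc1, hc2⟩
      rcases b with _ | ⟨y, b'⟩
      · simp at hc1; omega
      · have : PySem.List.pyGetD (a ++ y :: b') (p0 : Int) 0 = y := by
          rw [hp0]
          have := pyGetD_append_len a (y :: b') 0
          simpa using this
        rw [this] at hc2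
        exact hb y List.mem_cons_self hc2

-- _min_k's fold, characterised (pvMStep is definitionally the fold body of pvMinK)
def pvMStep (acc : Option Char × Int) (kv : Char × Int × List Int) : Option Char × Int :=
  if ((kv.2.2.length : Int)) > kv.2.1 + 1 then
    if acc.2 > PySem.List.pyGetD kv.2.2 kv.2.1 0 then
      (some kv.1, PySem.List.pyGetD kv.2.2 kv.2.1 0)
    else acc
  else acc

lemma pvMinK_eq (bp : List (Char × Int × List Int)) (ltx : Int) :
    pvMinK bp ltx = bp.foldl pvMStep (none, ltx) := rfl

lemma pvMFold_le (l : List (Char × Int × List Int)) (acc : Option Char × Int) :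
    (l.foldl pvMStep acc).2 ≤ acc.2 := by
  induction l generalizing acc with
  | nil => simp
  | cons kv t ih =>
    refine le_trans (ih (pvMStep acc kv)) ?_
    unfold pvMStep; split_ifs <;> simp_all <;> omega

lemma pvMFold_min (l : List (Char × Int × List Int)) (acc : Option Char × Int) :
    ∀ kv ∈ l, ((kv.2.2.length : Int)) > kv.2.1 + 1 →
      (l.foldl pvMStep acc).2 ≤ PySem.List.pyGetD kv.2.2 kv.2.1 0 := by
  induction l generalizing acc with
  | nil => simp
  | cons kv0 t ih =>
    intro kv hkv he
    rcases List.mem_cons.1 hkv with rfl | hkv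
    · refine le_trans (pvMFold_le t (pvMStep acc kv)) ?_
      unfold pvMStep; split_ifs <;> simp_all <;> omega
    · exact ih (pvMStep acc kv0) kv hkv he

lemma pvMFold_shape (l : List (Char × Int × List Int)) (acc : Option Char × Int) :
    l.foldl pvMStep acc = acc ∨
      ∃ kv ∈ l, ((kv.2.2.length : Int)) > kv.2.1 + 1 ∧
        l.foldl pvMStep acc = (some kv.1, PySem.List.pyGetD kv.2.2 kv.2.1 0) := by
  induction l generalizing acc with
  | nil => simp
  | cons kv0 t ih =>
    rcases ih (pvMStep acc kv0) with h | ⟨kv, hkv, he, hr⟩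
    · rw [List.foldl_cons, h]
      unfold pvMStep; split_ifs with h1 h2
      · exact Or.inr ⟨kv0, List.mem_cons_self, h1, rfl⟩
      · exact Or.inl rfl
      · exact Or.inl rfl
    · exact Or.inr ⟨kv, List.mem_cons_of_mem _ hkv, he, by rw [List.foldl_cons, hr]⟩

lemma pvMFold_none (l : List (Char × Int × List Int)) (acc : Option Char × Int)
    (h : ∀ kv ∈ l, ¬ ((kv.2.2.length : Int)) > kv.2.1 + 1) :
    l.foldl pvMStep acc = acc := by
  induction l generalizing acc with
  | nil => simp
  | cons kv0 t ih =>
    rw [List.foldl_cons]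
    have e : pvMStep acc kv0 = acc := by
      unfold pvMStep; rw [if_neg (h kv0 List.mem_cons_self)]
    rw [e]
    exact ih acc (fun kv hkv => h kv (List.mem_cons_of_mem _ hkv))


lemma pvOcc_shift (t : List Char) (s : Int) (c : Char) :
    pvOcc t s c = (pvOcc t 0 c).map (fun x => s + x) := by
  induction t generalizing s with
  | nil => simp [pvOcc]
  | cons d r ih =>
    simp only [pvOcc, List.map_append]
    congr 1
    · split <;> simp
    · rw [ih (s+1), ih (0+1), List.map_map]
      congr 1
      funext x
      simp; ring

-- facts about the head of a suffix-occurrence list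
lemma occ_head_facts (cs : List Char) (p : Nat) (c : Char) (q : Int) (L' : List Int)
    (hp : p ≤ cs.length) (he : pvOcc (cs.drop p) (p : Int) c = q :: L') :
    ∃ qn : Nat, q = (qn : Int) ∧ p ≤ qn ∧ qn < cs.length ∧ cs[qn]? = some c := by
  have hq : q ∈ pvOcc (cs.drop p) (p : Int) c := by simp [he]
  rcases (pvOcc_mem _ _ _ _).1 hq with ⟨k, hk, hqe, hkc⟩
  rw [List.getElem?_drop] at hkc
  exact ⟨p + k, by push_cast; omega, by omega, by simp at hk; omega, hkc⟩

lemma state_val (cs : List Char) (p : Nat) (c : Char) (k : Nat) (hp : p ≤ cs.length) :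
    PySem.List.pyGetD (pvOcc cs 0 c) (((pvOcc (cs.take p) 0 c).length : Int) + k) 0
      = (pvOcc (cs.drop p) (p : Int) c).getD k 0 := by
  rw [pvOcc_split cs p c hp]
  have e : ((pvOcc (cs.take p) 0 c).length : Int) + k
      = (((pvOcc (cs.take p) 0 c).length + k : Nat) : Int) := by push_cast; ring
  rw [e, pyGetD_append_len]

-- the characterisation of _min_k on the reachable state after consuming cs[0:p]
lemma pvMinK_spec (cs : List Char) (p : Nat) (hp : p ≤ cs.length) :
    ((∀ c ∈ pvSBreaks, (pvOcc (cs.drop p) (p : Int) c).length ≤ 1) ∧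
      pvMinK (pvState cs p) (cs.length : Int) = (none, (cs.length : Int)))
    ∨ (∃ mk q L', mk ∈ pvSBreaks ∧ pvOcc (cs.drop p) (p : Int) mk = q :: L' ∧ L' ≠ [] ∧
        pvMinK (pvState cs p) (cs.length : Int) = (some mk, q) ∧
        (∀ c ∈ pvSBreaks, ∀ q' L'', pvOcc (cs.drop p) (p : Int) c = q' :: L'' → L'' ≠ [] → q ≤ q')) := by
  have hmem : ∀ kv ∈ pvState cs p, ∃ c ∈ pvSBreaks,
      kv = (c, ((pvOcc (cs.take p) 0 c).length : Int), pvOcc cs 0 c) := by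
    intro kv hkv
    rcases List.mem_map.1 hkv with ⟨c, hc, rfl⟩
    exact ⟨c, hc, rfl⟩
  have hlen : ∀ c, (pvOcc cs 0 c).length
      = (pvOcc (cs.take p) 0 c).length + (pvOcc (cs.drop p) (p : Int) c).length := by
    intro c; rw [pvOcc_split cs p c hp, List.length_append]
  by_cases hex : ∃ c ∈ pvSBreaks, 2 ≤ (pvOcc (cs.drop p) (p : Int) c).length
  · right
    rcases hex with ⟨c0, hc0, h2⟩
    -- the c0 entry is eligible, and its inspected value is an index < len, so the fold moves
    have helig : ∀ c, 2 ≤ (pvOcc (cs.drop p) (p : Int) c).length →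
        (((pvOcc cs 0 c).length : Int)) > ((pvOcc (cs.take p) 0 c).length : Int) + 1 := by
      intro c h; rw [hlen c]; push_cast; omega
    have hval : ∀ c, PySem.List.pyGetD (pvOcc cs 0 c) ((pvOcc (cs.take p) 0 c).length : Int) 0
        = (pvOcc (cs.drop p) (p : Int) c).getD 0 0 := by
      intro c
      have := state_val cs p c 0 hp
      simpa using this
    have hheadlt : ∀ c q L', pvOcc (cs.drop p) (p : Int) c = q :: L' → q < (cs.length : Int) := by
      intro c q L' he
      rcases occ_head_facts cs p c q L' hp he with ⟨qn, rfl, -, h3, -⟩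
      exact_mod_cast h3
    rcases pvMFold_shape (pvState cs p) (none, (cs.length : Int)) with hsh | ⟨kv, hkv, helig', hr⟩
    · -- impossible: the fold result would be ≤ the head of c0's suffix list < len
      exfalso
      obtain ⟨q0, L0, he0⟩ : ∃ q0 L0, pvOcc (cs.drop p) (p : Int) c0 = q0 :: L0 := by
        cases h : pvOcc (cs.drop p) (p : Int) c0 with
        | nil => rw [h] at h2; simp at h2
        | cons a t => exact ⟨a, t, rfl⟩
      have hm := pvMFold_min (pvState cs p) (none, (cs.length : Int))
        (c0, ((pvOcc (cs.take p) 0 c0).length : Int), pvOcc cs 0 c0)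
        (List.mem_map.2 ⟨c0, hc0, rfl⟩) (helig c0 h2)
      rw [hval c0, he0, hsh] at hm
      have := hheadlt c0 q0 L0 he0
      simp at hm
      omega
    · rcases hmem kv hkv with ⟨mk, hmk, rfl⟩
      simp only at helig' hr
      have h2mk : 2 ≤ (pvOcc (cs.drop p) (p : Int) mk).length := by
        have := hlen mk; push_cast at helig'; omega
      obtain ⟨q, L1, heq⟩ : ∃ q L1, pvOcc (cs.drop p) (p : Int) mk = q :: L1 := by
        cases h : pvOcc (cs.drop p) (p : Int) mk with
        | nil => rw [h] at h2mk; simp at h2mk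
        | cons a t => exact ⟨a, t, rfl⟩
      have hL1 : L1 ≠ [] := by
        intro h; rw [h] at heq; rw [heq] at h2mk; simp at h2mk
      refine ⟨mk, q, L1, hmk, heq, hL1, ?_, ?_⟩
      · rw [pvMinK_eq, hr, hval mk, heq]; simp
      · intro c hc q' L'' he' hL''
        have h2c : 2 ≤ (pvOcc (cs.drop p) (p : Int) c).length := by
          rw [he']; cases L'' with | nil => simp at hL'' | cons a t => simp
        have hm := pvMFold_min (pvState cs p) (none, (cs.length : Int))
          (c, ((pvOcc (cs.take p) 0 c).length : Int), pvOcc cs 0 c)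
          (List.mem_map.2 ⟨c, hc, rfl⟩) (helig c h2c)
        rw [hval c, he'] at hm
        rw [← pvMinK_eq] at hm
        rw [pvMinK_eq, hr, hval mk, heq] at *
        simpa using hm
  · left
    push_neg at hex
    constructor
    · intro c hc; have := hex c hc; omega
    · rw [pvMinK_eq]
      apply pvMFold_none
      intro kv hkv
      rcases hmem kv hkv with ⟨c, hc, rfl⟩
      simp only
      have := hex c hc
      rw [hlen c]
      push_cast
      omega

lemma pvLookup_state (cs : List Char) (p : Nat) (c : Char) (hc : c ∈ pvSBreaks) :
    pvLookup (pvState cs p) c = (((pvOcc (cs.take p) 0 c).length : Int), pvOcc cs 0 c) := by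
  fin_cases hc <;> simp [pvLookup, pvState, pvSBreaks, List.find?]

lemma state_update (cs : List Char) (p w : Nat) (mk : Char) (nv : Int)
    (hnew : ∀ c ∈ pvSBreaks,
      (if c = mk then (c, ((pvOcc (cs.take p) 0 c).length : Int) + 2, pvOcc cs 0 c)
        else (c, pvAdvance ((pvOcc cs 0 c).length + 1) ((pvOcc (cs.take p) 0 c).length : Int)
          (pvOcc cs 0 c) nv, pvOcc cs 0 c))
      = (c, ((pvOcc (cs.take w) 0 c).length : Int), pvOcc cs 0 c)) :
    (pvState cs p).map (fun kv => if kv.1 = mk then (kv.1, kv.2.1 + 2, kv.2.2)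
      else (kv.1, pvAdvance (kv.2.2.length + 1) kv.2.1 kv.2.2 nv, kv.2.2)) = pvState cs w := by
  unfold pvState
  rw [List.map_map]
  apply List.map_congr_left
  intro c hc
  have := hnew c hc
  simpa using this

-- splitting a suffix-occurrence list at a later point w
lemma seg_decomp (cs : List Char) (p w : Nat) (c : Char) (hpw : p ≤ w) (hw : w ≤ cs.length) :
    pvOcc (cs.drop p) (p : Int) c
      = pvOcc ((cs.take w).drop p) (p : Int) c ++ pvOcc (cs.drop w) (w : Int) c := by
  have e : cs.drop p = ((cs.take w).drop p) ++ cs.drop w := by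
    conv_lhs => rw [← List.take_append_drop w cs]
    rw [List.drop_append_of_le_length (by simp; omega)]
  rw [e, pvOcc_append]
  congr 1
  have h1 : (((cs.take w).drop p).length : Int) = (w : Int) - p := by simp; omega
  rw [h1]
  ring_nf

lemma prefix_split_one (L P S : List Int) (q : Int)
    (hL : P ++ S = q :: L) (hpair : (q :: L).Pairwise (· < ·))
    (hP : ∀ x ∈ P, x ≤ q) (hS : ∀ x ∈ S, q < x) :
    P = [q] ∧ S = L := by
  have hLq : ∀ x ∈ L, q < x := (List.pairwise_cons.1 hpair).1
  cases P with
  | nil =>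
    exfalso
    have hS' : S = q :: L := by simpa using hL
    exact lt_irrefl q (hS q (by simp [hS']))
  | cons x P1 =>
    have hx : x = q := by
      have := congrArg (fun l => l.head?) hL
      simpa using this
    subst hx
    cases P1 with
    | nil => simp_all
    | cons y P2 =>
      exfalso
      have hy : y ∈ L := by
        have ht : y :: (P2 ++ S) = L := by simpa using congrArg List.tail hL
        rw [← ht]; simp
      have h1 := hLq y hy
      have h2 := hP y (by simp)
      omega

lemma prefix_split_two (R P S : List Int) (q nv : Int)
    (hL : P ++ S = q :: nv :: R) (hpair : (q :: nv :: R).Pairwise (· < ·))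
    (hP : ∀ x ∈ P, x ≤ nv) (hS : ∀ x ∈ S, nv < x) :
    P = [q, nv] ∧ S = R := by
  have hqnv : q < nv := (List.pairwise_cons.1 hpair).1 nv (by simp)
  have hRnv : ∀ x ∈ R, nv < x := (List.pairwise_cons.1 (List.pairwise_cons.1 hpair).2).1
  cases P with
  | nil =>
    exfalso
    have hS' : S = q :: nv :: R := by simpa using hL
    have := hS q (by simp [hS'])
    omega
  | cons x P1 =>
    have hx : x = q := by
      have := congrArg (fun l => l.head?) hL
      simpa using this
    subst hx
    have hL1 : P1 ++ S = nv :: R := by simpa using congrArg List.tail hL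
    cases P1 with
    | nil =>
      exfalso
      have hS' : S = nv :: R := by simpa using hL1
      exact lt_irrefl nv (hS nv (by simp [hS']))
    | cons y P2 =>
      have hy : y = nv := by
        have := congrArg (fun l => l.head?) hL1
        simpa using this
      subst hy
      have hL2 : P2 ++ S = R := by simpa using congrArg List.tail hL1
      cases P2 with
      | nil => simp_all
      | cons z P3 =>
        exfalso
        have hz : z ∈ R := by rw [← hL2]; simp
        have h1 := hRnv z hz
        have h2 := hP z (by simp)
        omega

-- s.find(c) for a single character, in terms of the occurrence list
lemma find_single (t : List Char) (c : Char) :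
    PySem.Chars.find t [c] = ((pvOcc t 0 c).headD (-1) : Int) := by
  cases hocc : pvOcc t 0 c with
  | nil =>
    simp only [List.headD_nil]
    rw [PySem.Chars.find_eq_neg_one_iff]
    intro hinf
    have hc : c ∈ t := hinf.subset (by simp)
    rcases List.mem_iff_getElem?.1 hc with ⟨k, hk⟩
    have hkm : ((k : Int)) ∈ pvOcc t 0 c := (pvOcc_mem t 0 c k).2 ⟨k, by
      rcases List.getElem?_eq_some_iff.1 hk with ⟨h, -⟩; omega, by simp, hk⟩
    rw [hocc] at hkm
    simp at hkm
  | cons q rest =>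
    simp only [List.headD_cons]
    have hq : q ∈ pvOcc t 0 c := by simp [hocc]
    rcases (pvOcc_mem t 0 c q).1 hq with ⟨qn, hqn, hqe, hqc⟩
    have hq0 : q = (qn : Int) := by omega
    have hinf : [c] <:+: t := by
      rcases List.getElem?_eq_some_iff.1 hqc with ⟨h, rfl⟩
      exact ⟨t.take qn, t.drop (qn+1), by
        rw [List.append_assoc]
        simpa using (List.take_append_getElem_drop ..)⟩
    have hge : 0 ≤ PySem.Chars.find t [c] := (PySem.Chars.find_nonneg_iff t [c]).2 hinf
    rcases PySem.Chars.find_spec hge with ⟨hpre, hmin⟩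
    set F := (PySem.Chars.find t [c]).toNat with hF
    have hFc : t[F]? = some c := by
      rcases hpre with ⟨u, hu⟩
      rw [← List.head?_drop, ← hu]
      simp
    have hFocc : ((F : Int)) ∈ pvOcc t 0 c := (pvOcc_mem t 0 c F).2 ⟨F, by
      rcases List.getElem?_eq_some_iff.1 hFc with ⟨h, -⟩; omega, by simp, hFc⟩
    have hle : q ≤ (F : Int) := head_min _ q rest (pvOcc_sorted t 0 c) hocc _ hFocc
    have hnlt : ¬ qn < F := by
      intro hlt
      apply hmin qn hlt
      rcases List.getElem?_eq_some_iff.1 hqc with ⟨h, rfl⟩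
      exact ⟨t.drop (qn+1), by simpa using (List.getElem_cons_drop ..).symm⟩
    omega

lemma find_from_occ (cs : List Char) (c : Char) (k : Nat) (hk : k ≤ cs.length) :
    PySem.Chars.findFrom cs [c] ((k : Nat) : Int) none
      = ((pvOcc (cs.drop k) (k : Int) c).headD (-1) : Int) := by
  rw [PySem.Chars.findFrom_natCast cs [c] k hk, find_single (cs.drop k) c]
  rw [pvOcc_shift (cs.drop k) (k : Int) c]
  cases hocc : pvOcc (cs.drop k) 0 c with
  | nil => simp
  | cons r rest =>
    have hr : r ∈ pvOcc (cs.drop k) 0 c := by simp [hocc]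
    have hr0 : 0 ≤ r := (pvOcc_bounds _ _ _ _ hr).1
    have hne : r ≠ -1 := by omega
    simp [hne, add_comm]

lemma scan_end (cs : List Char) : pvScanB cs cs.length = [] := by
  rw [pvScanB]
  simp

-- if no position in [p, q) opens a matched pair, the scan skips straight to q
lemma scan_skip (cs : List Char) (q : Nat) (hq : q ≤ cs.length) :
    ∀ (n p : Nat), q - p ≤ n → p ≤ q →
    (∀ (r : Nat) (hr : r < cs.length), p ≤ r → r < q → cs[r] ∈ pvSBreaks →
      pvOcc (cs.drop (r+1)) ((r+1 : Nat) : Int) (cs[r]) = []) →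
    pvScanB cs p = pvScanB cs q := by
  intro n
  induction n with
  | zero =>
    intro p h1 h2 _
    have hpq : p = q := by omega
    rw [hpq]
  | succ m ih =>
    intro p h1 h2 hno
    by_cases hpq : p = q
    · rw [hpq]
    · have hplt : p < q := by omega
      have hplen : p < cs.length := by omega
      have step : pvScanB cs p = pvScanB cs (p+1) := by
        rw [pvScanB, dif_pos hplen]
        by_cases hsb : cs[p] ∈ pvSBreaks
        · rw [if_pos hsb]
          have hocc := hno p hplen le_rfl hplt hsb
          have hff : PySem.Chars.findFrom cs [cs[p]] ((p + 1 : Nat) : Int) none = -1 := by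
            rw [find_from_occ cs (cs[p]) (p+1) (by omega), hocc]
            simp
          rw [dif_neg (by push_cast at hff ⊢; simp [hff])]
        · rw [if_neg hsb]
      rw [step]
      exact ih (p+1) (by omega) (by omega)
        (fun r hr hr1 hr2 hsb => hno r hr (by omega) hr2 hsb)


lemma occ_mem_nat (cs : List Char) (p : Nat) (c : Char) (x : Int)
    (hx : x ∈ pvOcc (cs.drop p) (p : Int) c) :
    ∃ xn : Nat, x = (xn : Int) ∧ p ≤ xn ∧ xn < cs.length ∧ cs[xn]? = some c := by
  have hb := pvOcc_bounds _ _ _ _ hx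
  have hxn : x = ((x.toNat : Nat) : Int) := by omega
  rw [hxn] at hx
  have := (pvOcc_drop_mem cs p c x.toNat).1 hx
  exact ⟨x.toNat, hxn, this.1, this.2.1, this.2.2⟩

-- a quote at r that still has a partner further right yields two live occurrences from p
lemma paired_two (cs : List Char) (p r : Nat) (c : Char) (hpr : p ≤ r) (hr : r < cs.length)
    (hc : cs[r]? = some c) (hne : pvOcc (cs.drop (r+1)) ((r+1 : Nat) : Int) c ≠ []) :
    ∃ q' L'', pvOcc (cs.drop p) (p : Int) c = q' :: L'' ∧ L'' ≠ [] ∧ q' ≤ (r : Int) := by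
  cases hx : pvOcc (cs.drop (r+1)) ((r+1 : Nat) : Int) c with
  | nil => exact absurd hx hne
  | cons x T =>
    have hxm : x ∈ pvOcc (cs.drop (r+1)) ((r+1 : Nat) : Int) c := by
      rw [hx]; exact List.mem_cons_self
    rcases occ_mem_nat cs (r+1) c x hxm with ⟨xn, rfl, hx1, hx2, hx3⟩
    have hrm : ((r : Int)) ∈ pvOcc (cs.drop p) (p : Int) c :=
      (pvOcc_drop_mem cs p c r).2 ⟨hpr, hr, hc⟩
    have hxm2 : ((xn : Int)) ∈ pvOcc (cs.drop p) (p : Int) c :=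
      (pvOcc_drop_mem cs p c xn).2 ⟨by omega, hx2, hx3⟩
    have h2 : 2 ≤ (pvOcc (cs.drop p) (p : Int) c).length :=
      two_mem_two_le _ _ _ hrm hxm2 (by
        intro he
        have : r = xn := by exact_mod_cast he
        omega)
    cases hlist : pvOcc (cs.drop p) (p : Int) c with
    | nil => rw [hlist] at h2; simp at h2
    | cons q' L'' =>
      refine ⟨q', L'', rfl, ?_, ?_⟩
      · intro hnil
        rw [hlist, hnil] at h2
        simp at h2
      · exact head_min _ q' L'' (hlist ▸ pvOcc_sorted (cs.drop p) (p : Int) c) rfl _ (hlist ▸ hrm)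

-- the main correspondence: one iteration of A's while-loop emits exactly the pair the
-- forward scan finds next, and leaves A in the state "everything before nv+1 consumed"
lemma loopA_scan (cs : List Char) : ∀ (fuel : Nat) (p : Nat) (intrv : List (Int × Int)),
    p ≤ cs.length → cs.length < fuel + p →
    pvLoopA fuel (pvState cs p) (cs.length : Int)
      (pvMinK (pvState cs p) (cs.length : Int)).1 (pvMinK (pvState cs p) (cs.length : Int)).2 intrv
      = intrv ++ pvScanB cs p := by
  intro fuel
  induction fuel with
  | zero => intro p intrv h1 h2; omega
  | succ f ih =>
    intro p intrv hp hf
    rcases pvMinK_spec cs p hp with ⟨hno, hmk⟩ | ⟨mk, q, L', hmk, heq, hL', hr, hmin⟩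
    · -- no character has two live occurrences: A stops, B scans to the end emitting nothing
      rw [hmk]
      have hscan : pvScanB cs p = [] := by
        rw [scan_skip cs cs.length le_rfl (cs.length - p) p (by omega) hp ?_, scan_end]
        intro r hr hr1 hr2 hsb
        by_contra hne
        rcases paired_two cs p r (cs[r]) hr1 hr (by simp) hne with ⟨q', L'', hlist, hL'', -⟩
        have := hno (cs[r]) hsb
        rw [hlist] at this
        cases L'' with
        | nil => exact hL'' rfl
        | cons a t => simp at this
      rw [hscan]
      simp [pvLoopA]
    · -- A pairs (q, nv); B's scan skips to q and finds nv
      rcases occ_head_facts cs p mk q L' hp heq with ⟨qn, rfl, hpq, hqlen, hqc⟩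
      cases L' with
      | nil => exact absurd rfl hL'
      | cons nv R =>
      have hnvm : nv ∈ pvOcc (cs.drop p) (p : Int) mk := by simp [heq]
      rcases occ_mem_nat cs p mk nv hnvm with ⟨nvN, hnv, hpnv, hnvlen, hnvc⟩
      have hsorted : ((qn : Int) :: nv :: R).Pairwise (· < ·) := heq ▸ pvOcc_sorted (cs.drop p) (p : Int) mk
      have hqnv : (qn : Int) < nv := (List.pairwise_cons.1 hsorted).1 nv (by simp)
      have hqnvN : qn < nvN := by omega
      set w : Nat := nvN + 1 with hwdef
      have hw : w ≤ cs.length := by omega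
      have hcastw : ((w : Nat) : Int) = nv + 1 := by rw [hnv]; omega
      -- cs[qn] is mk
      have hcsq : cs[qn]'hqlen = mk := by
        have := List.getElem?_eq_some_iff.1 hqc
        rcases this with ⟨h, e⟩; exact e
      -- the two-step prefix decomposition: occurrences of mk in [p, w) are exactly [q, nv]
      have hsegw := seg_decomp cs p w mk (by omega) hw
      have hPS : pvOcc ((cs.take w).drop p) (p : Int) mk ++ pvOcc (cs.drop w) (w : Int) mk
          = (qn : Int) :: nv :: R := by rw [← hsegw, heq]
      have hPle : ∀ x ∈ pvOcc ((cs.take w).drop p) (p : Int) mk, x ≤ nv := by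
        intro x hx
        have hb := pvOcc_bounds _ _ _ _ hx
        have hlen : (((cs.take w).drop p).length : Int) = (w : Int) - p := by simp; omega
        have := hb.2
        rw [hlen] at this
        have : x < (w : Int) := by omega
        omega
      have hSgt : ∀ x ∈ pvOcc (cs.drop w) (w : Int) mk, nv < x := by
        intro x hx
        have hb := pvOcc_bounds _ _ _ _ hx
        omega
      have hPtwo := prefix_split_two R _ _ (qn : Int) nv hPS hsorted hPle hSgt
      -- occurrences of mk in [p, qn+1) are exactly [q]
      have hsegq := seg_decomp cs p (qn+1) mk (by omega) (by omega)
      have hPS1 : pvOcc ((cs.take (qn+1)).drop p) (p : Int) mk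
          ++ pvOcc (cs.drop (qn+1)) ((qn+1 : Nat) : Int) mk = (qn : Int) :: nv :: R := by
        rw [← hsegq, heq]
      have hP1le : ∀ x ∈ pvOcc ((cs.take (qn+1)).drop p) (p : Int) mk, x ≤ (qn : Int) := by
        intro x hx
        have hb := pvOcc_bounds _ _ _ _ hx
        have hlen : (((cs.take (qn+1)).drop p).length : Int) = ((qn+1 : Nat) : Int) - p := by
          simp; omega
        have h2 := hb.2
        rw [hlen] at h2
        push_cast at h2 ⊢
        omega
      have hS1gt : ∀ x ∈ pvOcc (cs.drop (qn+1)) ((qn+1 : Nat) : Int) mk, (qn : Int) < x := by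
        intro x hx
        have hb := pvOcc_bounds _ _ _ _ hx
        push_cast at hb
        omega
      have hP1 := prefix_split_one (nv :: R) _ _ (qn : Int) hPS1 hsorted hP1le hS1gt
      -- B: the scan skips [p, qn), then emits (qn, nv) and resumes at w
      have hscan : pvScanB cs p = ((qn : Int), nv) :: pvScanB cs w := by
        have hskip : pvScanB cs p = pvScanB cs qn := by
          apply scan_skip cs qn (by omega) (qn - p) p (by omega) (by omega)
          intro r hr hr1 hr2 hsb
          by_contra hne
          rcases paired_two cs p r (cs[r]) hr1 hr (by simp) hne with ⟨q', L'', hlist, hL'', hqr⟩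
          have hqq' := hmin (cs[r]) hsb q' L'' hlist hL''
          omega
        rw [hskip, pvScanB, dif_pos hqlen, if_pos (hcsq ▸ hmk)]
        have hff : PySem.Chars.findFrom cs [cs[qn]'hqlen] ((qn + 1 : Nat) : Int) none = nv := by
          rw [hcsq, find_from_occ cs mk (qn+1) (by omega), hP1.2]
          simp
        rw [dif_pos (by rw [hff]; omega)]
        rw [hff, hnv]
        simp only [Int.toNat_natCast]
        rw [hwdef]
      -- A: after this iteration the state is pvState cs w
      have hbp' : (pvState cs p).map (fun kv => if kv.1 = mk then (kv.1, kv.2.1 + 2, kv.2.2)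
          else (kv.1, pvAdvance (kv.2.2.length + 1) kv.2.1 kv.2.2 nv, kv.2.2)) = pvState cs w := by
        apply state_update cs p w mk nv
        intro c hc
        by_cases hcm : c = mk
        · subst hcm
          rw [if_pos rfl]
          have hsplitw : pvOcc (cs.take w) 0 c = pvOcc (cs.take p) 0 c
              ++ pvOcc ((cs.take w).drop p) (p : Int) c := by
            have h1 := pvOcc_split (cs.take w) p c (by simp; omega)
            rw [List.take_take, Nat.min_eq_left (by omega)] at h1
            exact h1
          rw [hsplitw, hPtwo.1]
          simp
        · rw [if_neg hcm]
          have hsplit := pvOcc_split cs w c hw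
          have hsplitw : pvOcc (cs.take w) 0 c = pvOcc (cs.take p) 0 c
              ++ pvOcc ((cs.take w).drop p) (p : Int) c := by
            have h1 := pvOcc_split (cs.take w) p c (by simp; omega)
            rw [List.take_take, Nat.min_eq_left (by omega)] at h1
            exact h1
          have ha : ∀ x ∈ pvOcc (cs.take w) 0 c, x < nv := by
            intro x hx
            rcases (pvOcc_mem _ _ _ _).1 hx with ⟨k, hk, hxe, hkc⟩
            have hkw : k < w := by simp at hk; omega
            rw [List.getElem?_take_of_lt hkw] at hkc
            have hkne : k ≠ nvN := by
              intro he
              rw [he, hnvc] at hkc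
              exact hcm (by injection hkc with h; exact h.symm)
            have : k < nvN := by omega
            omega
          have hb : ∀ x ∈ pvOcc (cs.drop w) (w : Int) c, ¬ x < nv := by
            intro x hx
            have hbd := pvOcc_bounds _ _ _ _ hx
            omega
          have hle : (pvOcc (cs.take p) 0 c).length ≤ (pvOcc (cs.take w) 0 c).length := by
            rw [hsplitw]; simp
          have hadv := pvAdvance_spec (pvOcc (cs.take w) 0 c) (pvOcc (cs.drop w) (w : Int) c)
            nv ha hb ((pvOcc cs 0 c).length + 1) ((pvOcc (cs.take p) 0 c).length)
            hle (by rw [pvOcc_split cs w c hw]; simp; omega)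
          rw [pvOcc_split cs w c hw] at hadv ⊢
          rw [hadv]
      -- put the iteration together
      rw [hr]
      show pvLoopA (f+1) (pvState cs p) (cs.length : Int) (some mk) (qn : Int) intrv
        = intrv ++ pvScanB cs p
      simp only [pvLoopA]
      rw [pvLookup_state cs p mk hmk]
      simp only
      have hnveq : PySem.List.pyGetD (pvOcc cs 0 mk)
          (((pvOcc (cs.take p) 0 mk).length : Int) + 1) 0 = nv := by
        have h := state_val cs p mk 1 hp
        rw [heq] at h
        simpa using h
      rw [hnveq, hbp', hscan]
      rw [ih w (intrv ++ [((qn : Int), nv)]) hw (by omega)]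
      simp

-- the position-collecting for-loop produces exactly the occurrence lists
lemma build_fold (t : List Char) : ∀ (s : Nat) (g : Char → Int × List Int),
    ((t.zip (PySem.List.pyRange (s : Int) ((s : Int) + t.length) 1)).filter
      (fun m => m.1 ∈ pvSBreaks)).foldl
      (fun b ni => b.map (fun kv => if kv.1 = ni.1 then (kv.1, kv.2.1, kv.2.2 ++ [ni.2]) else kv))
      (pvSBreaks.map (fun c => (c, g c)))
    = pvSBreaks.map (fun c => (c, (g c).1, (g c).2 ++ pvOcc t (s : Int) c)) := by
  induction t with
  | nil =>
    intro s g
    simp [pvOcc]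
  | cons d r ih =>
    intro s g
    have hcons : PySem.List.pyRange (s : Int) ((s : Int) + ((d :: r).length : Int)) 1
        = (s : Int) :: PySem.List.pyRange ((s : Int) + 1) ((s : Int) + ((d :: r).length : Int)) 1 :=
      PySem.List.pyRange_one_cons (by push_cast [List.length_cons]; omega)
    rw [hcons]
    have hend : (s : Int) + (((d :: r).length : Nat) : Int) = (((s+1 : Nat) : Int)) + (r.length : Int) := by
      push_cast [List.length_cons]; ring
    rw [List.zip_cons_cons, List.filter_cons]
    have hcast1 : (s : Int) + 1 = ((s + 1 : Nat) : Int) := by push_cast; ring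
    by_cases hd : d ∈ pvSBreaks
    · rw [if_pos (by simpa using hd)]
      rw [List.foldl_cons]
      have hstep : (pvSBreaks.map (fun c => (c, g c))).map
          (fun kv => if kv.1 = (d, (s : Int)).1 then (kv.1, kv.2.1, kv.2.2 ++ [(d, (s : Int)).2]) else kv)
          = pvSBreaks.map (fun c => (c,
              if c = d then ((g c).1, (g c).2 ++ [(s : Int)]) else g c)) := by
        rw [List.map_map]
        apply List.map_congr_left
        intro c _
        by_cases hcd : c = d <;> simp [hcd]
      rw [hstep, hcast1, hend, ih (s+1) (fun c => if c = d then ((g c).1, (g c).2 ++ [(s : Int)]) else g c)]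
      apply List.map_congr_left
      intro c _
      by_cases hcd : c = d
      · subst hcd
        simp [pvOcc]
      · have : d ≠ c := fun h => hcd h.symm
        simp [pvOcc, this, hcd]
    · rw [if_neg (by simpa using hd)]
      rw [hcast1, hend, ih (s+1) g]
      apply List.map_congr_left
      intro c hc
      have hdc : d ≠ c := fun h => hd (h ▸ hc)
      simp [pvOcc, hdc]

lemma final_eq (cs : List Char) :
    pvLoopA (cs.length + 1)
      (((cs.zip (PySem.List.pyRange 0 (cs.length : Int) 1)).filter (fun m => m.1 ∈ pvSBreaks)).foldl
        (fun b ni => b.map (fun kv => if kv.1 = ni.1 then (kv.1, kv.2.1, kv.2.2 ++ [ni.2]) else kv))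
        (pvSBreaks.map (fun s => (s, 0, []))))
      (cs.length : Int)
      (pvMinK (((cs.zip (PySem.List.pyRange 0 (cs.length : Int) 1)).filter (fun m => m.1 ∈ pvSBreaks)).foldl
        (fun b ni => b.map (fun kv => if kv.1 = ni.1 then (kv.1, kv.2.1, kv.2.2 ++ [ni.2]) else kv))
        (pvSBreaks.map (fun s => (s, 0, [])))) (cs.length : Int)).1
      (pvMinK (((cs.zip (PySem.List.pyRange 0 (cs.length : Int) 1)).filter (fun m => m.1 ∈ pvSBreaks)).foldl
        (fun b ni => b.map (fun kv => if kv.1 = ni.1 then (kv.1, kv.2.1, kv.2.2 ++ [ni.2]) else kv))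
        (pvSBreaks.map (fun s => (s, 0, [])))) (cs.length : Int)).2
      [] = pvScanB cs 0 := by
  have hbp : ((cs.zip (PySem.List.pyRange 0 (cs.length : Int) 1)).filter (fun m => m.1 ∈ pvSBreaks)).foldl
        (fun b ni => b.map (fun kv => if kv.1 = ni.1 then (kv.1, kv.2.1, kv.2.2 ++ [ni.2]) else kv))
        (pvSBreaks.map (fun s => (s, 0, []))) = pvState cs 0 := by
    have h := build_fold cs 0 (fun _ => ((0 : Int), ([] : List Int)))
    simp only [Nat.cast_zero, zero_add] at h
    rw [h]
    unfold pvState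
    apply List.map_congr_left
    intro c _
    simp [pvOcc]
  rw [hbp]
  have := loopA_scan cs (cs.length + 1) 0 [] (by omega) (by omega)
  simpa using this

theorem quote_breaker_py_spec : Claim_equal_quote_breaker_py := by
  intro tx _
  show quote_breaker_py tx = quote_breaker_py_alt tx
  unfold quote_breaker_py quote_breaker_py_alt
  simp only [PySem.Str.len_eq]
  exact final_eq tx.toList
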